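-- pv_equiv track=rewrite | github.com/alexlm78/AoC | 2024/Day08/solve_day08.py | count_unique_antinodes_part2
-- ===== SOURCE A (Python) =====
-- from collections import defaultdict
-- from math import gcd
--
-- def find_antennas(grid: list[str]) -> dict[str, list[tuple[int, int]]]:
--     by_freq: dict[str, list[tuple[int, int]]] = defaultdict(list)
--     for r, row in enumerate(grid):
--         for c, ch in enumerate(row):
--             if ch != ".":
--                 by_freq[ch].append((r, c))
--     return by_freq
--
-- def count_unique_antinodes_part2(grid: list[str]) -> int:
--     """
--     Harmonics model (Part 2):
--     Any grid position exactly in line with at least two antennas of the same frequency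
--     becomes an antinode, regardless of distance. This includes antenna positions themselves
--     (unless there's only a single antenna of that frequency).
--     """
--     if not grid:
--         return 0
--
--     rows, cols = len(grid), len(grid[0])
--     antennas = find_antennas(grid)
--     antinode_set: set[tuple[int, int]] = set()
--
--     for freq, points in antennas.items():
--         if len(points) < 2:
--             continue
--         # For each pair, mark the entire line within the grid, stepping by the reduced vector
--         n = len(points)
--         for i in range(n):
--             for j in range(i + 1, n):
--                 a = points[i]
--                 b = points[j]
--                 dr = b[0] - a[0]
--                 dc = b[1] - a[1]
--                 g = gcd(abs(dr), abs(dc))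
--                 step_r = dr // g
--                 step_c = dc // g
--
--                 # Walk backwards from 'a' until leaving the grid
--                 r, c = a
--                 while 0 <= r < rows and 0 <= c < cols:
--                     antinode_set.add((r, c))
--                     r -= step_r
--                     c -= step_c
--
--                 # Walk forwards from 'a' until leaving the grid
--                 r, c = a[0] + step_r, a[1] + step_c
--                 while 0 <= r < rows and 0 <= c < cols:
--                     antinode_set.add((r, c))
--                     r += step_r
--                     c += step_c
--
--     return len(antinode_set)
-- ===== SOURCE B (Python) =====
-- def count_unique_antinodes_part2(grid: list[str]) -> int:
--     """Count the cells of the rows x cols rectangle that are in line with some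
--     pair of same-frequency antennas, by testing each cell once against a
--     cross-product collinearity predicate over the precomputed antenna pairs
--     (instead of walking every pair's line into a set)."""
--     if not grid:
--         return 0
--     rows, cols = len(grid), len(grid[0])
--     by_freq: dict[str, list[tuple[int, int]]] = {}
--     for r, row in enumerate(grid):
--         for c, ch in enumerate(row):
--             if ch != ".":
--                 by_freq.setdefault(ch, []).append((r, c))
--     pairs: list[tuple[tuple[int, int], tuple[int, int]]] = []
--     for pts in by_freq.values():
--         rest = pts
--         while rest:
--             a = rest[0]
--             rest = rest[1:]
--             for b in rest:
--                 pairs.append((a, b))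
--     total = 0
--     for r in range(rows):
--         for c in range(cols):
--             if any((b0 - a0) * (c - a1) == (b1 - a1) * (r - a0)
--                    for (a0, a1), (b0, b1) in pairs):
--                 total += 1
--     return total
-- ===== Notes on version B (the rewrite author's own statement) =====
-- stated objective: alternative
-- what changed: Instead of walking every same-frequency pair's line step by step into a hash set and returning its size, B precomputes the pair list once and counts grid cells by a direct cross-product collinearity test per cell; Pre_ restricts to the natural rectangular-grid domain (every antenna of a repeated frequency at a column < len(grid[0])) - on ragged grids outside it the two implementations may bound a pair's line differently.
-- outside the precondition, e.g. on count_unique_antinodes_part2(['.', 'baa']): A returns 0, B returns 1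
import Mathlib
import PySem

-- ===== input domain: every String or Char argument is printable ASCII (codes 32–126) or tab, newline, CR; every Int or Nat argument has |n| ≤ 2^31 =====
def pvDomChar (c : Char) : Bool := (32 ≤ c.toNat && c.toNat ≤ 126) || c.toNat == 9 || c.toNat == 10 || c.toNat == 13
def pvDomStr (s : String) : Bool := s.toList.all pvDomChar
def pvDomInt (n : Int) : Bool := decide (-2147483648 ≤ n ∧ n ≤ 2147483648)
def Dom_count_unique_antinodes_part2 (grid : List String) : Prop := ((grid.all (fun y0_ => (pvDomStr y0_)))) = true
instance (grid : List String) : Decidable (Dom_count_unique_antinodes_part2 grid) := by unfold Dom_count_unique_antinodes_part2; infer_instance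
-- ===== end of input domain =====

-- B replaces A's per-pair line walks into a hash set by a per-cell cross-product
-- collinearity test over the precomputed pair list (alternative algorithm, same result).

-- ===== PORT A =====
-- find_antennas: defaultdict(list); by_freq[ch].append((r, c)) is Dict.modify ch [] (· ++ [(r, c)])
def pvFindAntennas (grid : List String) : PySem.Dict Char (List (Int × Int)) :=
  (PySem.List.enumerate grid 0).foldl (fun d p =>
    (PySem.List.enumerate p.2.toList 0).foldl (fun d q =>
      if q.2 ≠ '.' then d.modify q.2 [] (· ++ [(p.1, q.1)]) else d) d)
    PySem.Dict.empty

-- the Python 'while 0 <= r < rows and 0 <= c < cols: add; r += ur; c += uc' loop, with fuel;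
-- fuel (rows+cols).toNat + 2 strictly exceeds the iteration count whenever the loop terminates
-- (each step moves r or c by at least 1 while staying in the rectangle), so it never cuts the walk short.
def pvWalk (fuel : Nat) (rows cols ur uc : Int) (r c : Int) (s : PySem.Set (Int × Int)) :
    PySem.Set (Int × Int) :=
  match fuel with
  | 0 => s
  | fuel + 1 =>
    if 0 ≤ r ∧ r < rows ∧ 0 ≤ c ∧ c < cols then
      pvWalk fuel rows cols ur uc (r + ur) (c + uc) (PySem.Set.add s (r, c))
    else s

-- the body of A's innermost (i, j) pair loop: gcd-reduced step, then the two walks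
def pvPairStep (rows cols : Int) (fuel : Nat) (points : List (Int × Int))
    (s : PySem.Set (Int × Int)) (i j : Int) : PySem.Set (Int × Int) :=
  let a := PySem.List.pyGetD points i (0, 0)
  let b := PySem.List.pyGetD points j (0, 0)
  let dr := b.1 - a.1
  let dc := b.2 - a.2
  let g : Int := Int.gcd dr dc
  let sr := PySem.Int.floordiv dr g
  let sc := PySem.Int.floordiv dc g
  let s := pvWalk fuel rows cols (-sr) (-sc) a.1 a.2 s
  pvWalk fuel rows cols sr sc (a.1 + sr) (a.2 + sc) s

def count_unique_antinodes_part2 (grid : List String) : Int :=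
  match grid with
  | [] => 0
  | g0 :: _ =>
    let rows : Int := grid.length
    let cols : Int := PySem.Str.len g0
    let antennas := pvFindAntennas grid
    let fuel : Nat := (rows + cols).toNat + 2
    let s := antennas.items.foldl (fun s fp =>
      if fp.2.length < 2 then s else
      let n : Int := fp.2.length
      (PySem.List.pyRange 0 n 1).foldl (fun s i =>
        (PySem.List.pyRange (i + 1) n 1).foldl (fun s j =>
          pvPairStep rows cols fuel fp.2 s i j) s) s)
      PySem.Set.empty
    PySem.Set.len s

-- ===== PORT B =====
-- 'rest = pts; while rest: a = rest[0]; rest = rest[1:]; for b in rest: pairs.append((a, b))'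
def pvPairsB (pts : List (Int × Int)) (ps : List ((Int × Int) × (Int × Int))) :
    List ((Int × Int) × (Int × Int)) :=
  match pts with
  | [] => ps
  | a :: rest => pvPairsB rest (rest.foldl (fun ps b => ps ++ [(a, b)]) ps)

def count_unique_antinodes_part2_alt (grid : List String) : Int :=
  match grid with
  | [] => 0
  | g0 :: _ =>
    let rows : Int := grid.length
    let cols : Int := PySem.Str.len g0
    -- by_freq.setdefault(ch, []).append((r, c)) is Dict.modify ch [] (· ++ [(r, c)])
    let byFreq := (PySem.List.enumerate grid 0).foldl (fun d p =>
      (PySem.List.enumerate p.2.toList 0).foldl (fun d q =>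
        if q.2 ≠ '.' then d.modify q.2 [] (· ++ [(p.1, q.1)]) else d) d)
      PySem.Dict.empty
    let pairs := byFreq.values.foldl (fun ps pts => pvPairsB pts ps) []
    (PySem.List.pyRange 0 rows 1).foldl (fun t r =>
      (PySem.List.pyRange 0 cols 1).foldl (fun t c =>
        if pairs.any (fun pr =>
            (pr.2.1 - pr.1.1) * (c - pr.1.2) == (pr.2.2 - pr.1.2) * (r - pr.1.1)) then
          t + 1
        else t) t) 0

-- ===== PRECONDITION & SPEC =====
-- Pre_ restricts to the function's natural rectangular-grid domain: every antenna of a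
-- repeated frequency lies at a column < len(grid[0]). On ragged grids outside it the two
-- implementations may bound a pair's line differently and count different cells.
def Pre_count_unique_antinodes_part2 (grid : List String) : Prop :=
  ∀ s ∈ grid, ∀ p ∈ s.toList.zipIdx, p.1 ≠ '.' →
    2 ≤ (grid.map String.toList).flatten.count p.1 →
    p.2 < (grid.headD "").toList.length
instance (grid : List String) : Decidable (Pre_count_unique_antinodes_part2 grid) := by
  unfold Pre_count_unique_antinodes_part2; infer_instance

def pvWitness_count_unique_antinodes_part2 : List String := ["ab", "a."]

def Spec_count_unique_antinodes_part2 (grid : List String) (out : Int) : Prop :=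
  out = count_unique_antinodes_part2_alt grid
instance (grid : List String) (out : Int) : Decidable (Spec_count_unique_antinodes_part2 grid out) := by
  unfold Spec_count_unique_antinodes_part2; infer_instance

-- ===== CLAIM (what is proved, stated in full; the proofs are below) =====
def Claim_equal_count_unique_antinodes_part2 : Prop :=
  ∀ (grid : List String), Dom_count_unique_antinodes_part2 grid →
    Pre_count_unique_antinodes_part2 grid →
    Spec_count_unique_antinodes_part2 grid (count_unique_antinodes_part2 grid)

-- ===== LEMMAS AND PROOFS =====

def pvInR (rows cols : Int) (x : Int × Int) : Prop :=
  0 ≤ x.1 ∧ x.1 < rows ∧ 0 ≤ x.2 ∧ x.2 < cols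

def pvColl (a b x : Int × Int) : Prop :=
  (b.1 - a.1) * (x.2 - a.2) = (b.2 - a.2) * (x.1 - a.1)

lemma pv_foldl_mem {α β : Type} (C : α → β → Prop)
    (l : List α) (f : List β → α → List β)
    (h : ∀ s a, a ∈ l → ∀ x, x ∈ f s a ↔ x ∈ s ∨ C a x) :
    ∀ s x, x ∈ l.foldl f s ↔ x ∈ s ∨ ∃ a ∈ l, C a x := by
  induction l with
  | nil => simp
  | cons a t ih =>
    intro s x
    have h' : ∀ s b, b ∈ t → ∀ x, x ∈ f s b ↔ x ∈ s ∨ C b x := by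
      intro s b hb; exact h s b (List.mem_cons_of_mem _ hb)
    simp only [List.foldl_cons]
    rw [ih h', h s a (List.mem_cons_self ..)]
    simp only [List.mem_cons]
    constructor
    · rintro ((hx | hx) | ⟨b, hb, hc⟩)
      · exact Or.inl hx
      · exact Or.inr ⟨a, Or.inl rfl, hx⟩
      · exact Or.inr ⟨b, Or.inr hb, hc⟩
    · rintro (hx | ⟨b, (rfl | hb), hc⟩)
      · exact Or.inl (Or.inl hx)
      · exact Or.inl (Or.inr hc)
      · exact Or.inr ⟨b, hb, hc⟩

lemma pv_foldl_nodup {α β : Type} (l : List α) (f : List β → α → List β)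
    (h : ∀ s a, a ∈ l → s.Nodup → (f s a).Nodup) :
    ∀ s, s.Nodup → (l.foldl f s).Nodup := by
  induction l with
  | nil => intro s hs; simpa
  | cons a t ih =>
    intro s hs
    simp only [List.foldl_cons]
    exact ih (fun s b hb => h s b (List.mem_cons_of_mem _ hb)) _
      (h s a (List.mem_cons_self ..) hs)

lemma pv_mem_pvWalk (rows cols ur uc : Int) :
    ∀ (fuel : Nat) (r c : Int) (s : PySem.Set (Int × Int)) (x : Int × Int),
      x ∈ pvWalk fuel rows cols ur uc r c s ↔
        x ∈ s ∨ ∃ k : Nat, k < fuel ∧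
          (∀ m : Nat, m ≤ k → pvInR rows cols (r + m * ur, c + m * uc)) ∧
          x = (r + k * ur, c + k * uc) := by
  intro fuel
  induction fuel with
  | zero => intro r c s x; simp [pvWalk]
  | succ fuel ih =>
    intro r c s x
    by_cases hrc : 0 ≤ r ∧ r < rows ∧ 0 ≤ c ∧ c < cols
    · rw [pvWalk, if_pos hrc, ih]
      have hrc' : pvInR rows cols (r, c) := hrc
      constructor
      · rintro (hx | ⟨k, hk, hok, rfl⟩)
        · rw [PySem.Set.mem_add] at hx
          rcases hx with hx | rfl
          · exact Or.inl hx
          · refine Or.inr ⟨0, by omega, ?_, by simp⟩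
            intro m hm; interval_cases m; simpa using hrc'
        · refine Or.inr ⟨k + 1, by omega, ?_, by push_cast; ring_nf⟩
          intro m hm
          rcases Nat.eq_zero_or_pos m with rfl | hpos
          · simpa using hrc'
          · have := hok (m - 1) (by omega)
            have hm1 : ((m - 1 : Nat) : Int) = (m : Int) - 1 := by omega
            rw [hm1] at this
            convert this using 2 <;> ring
      · rintro (hx | ⟨k, hk, hok, rfl⟩)
        · exact Or.inl (by rw [PySem.Set.mem_add]; exact Or.inl hx)
        · rcases Nat.eq_zero_or_pos k with rfl | hpos
          · exact Or.inl (by rw [PySem.Set.mem_add]; right; simp)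
          · refine Or.inr ⟨k - 1, by omega, ?_, ?_⟩
            · intro m hm
              have := hok (m + 1) (by omega)
              push_cast at this ⊢
              convert this using 2 <;> ring
            · have hk1 : ((k - 1 : Nat) : Int) = (k : Int) - 1 := by omega
              rw [hk1, Prod.ext_iff]; constructor <;> ring
    · rw [pvWalk, if_neg hrc]
      constructor
      · exact Or.inl
      · rintro (hx | ⟨k, hk, hok, rfl⟩)
        · exact hx
        · exact absurd (by simpa using hok 0 (by omega)) hrc

lemma pv_nodup_pvWalk (rows cols ur uc : Int) :
    ∀ (fuel : Nat) (r c : Int) (s : PySem.Set (Int × Int)),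
      s.Nodup → (pvWalk fuel rows cols ur uc r c s).Nodup := by
  intro fuel
  induction fuel with
  | zero => intro r c s hs; simpa [pvWalk]
  | succ fuel ih =>
    intro r c s hs
    rw [pvWalk]
    split
    · exact ih _ _ _ (PySem.Set.nodup_add _ _ hs)
    · exact hs

lemma pv_between (x0 R st : Int) {u t : Int} (h0 : 0 ≤ u) (hut : u ≤ t)
    (hA : 0 ≤ x0 ∧ x0 < R) (hB : 0 ≤ x0 + t * st ∧ x0 + t * st < R) :
    0 ≤ x0 + u * st ∧ x0 + u * st < R := by
  rcases (by omega : st ≤ 0 ∨ 0 < st) with hs | hs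
  · constructor
    · nlinarith [mul_nonneg (sub_nonneg.mpr hut) (neg_nonneg.mpr hs), hB.1]
    · nlinarith [mul_nonpos_of_nonneg_of_nonpos h0 hs, hA.2]
  · constructor
    · nlinarith [mul_nonneg h0 hs.le, hA.1]
    · nlinarith [mul_le_mul_of_nonneg_right hut hs.le, hB.2]

lemma pv_exists_t {sr sc u v : Int} (hco : Int.gcd sr sc = 1) (h : sr * v = sc * u) :
    ∃ t : Int, u = t * sr ∧ v = t * sc := by
  by_cases hsr : sr = 0
  · subst hsr
    have hsc : sc = 1 ∨ sc = -1 := by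
      have : sc.natAbs = 1 := by simpa [Int.gcd] using hco
      rcases Int.natAbs_eq sc with he | he <;> omega
    have hu : u = 0 := by
      rcases hsc with rfl | rfl <;> omega
    refine ⟨v * sc, by simp [hu], ?_⟩
    rcases hsc with rfl | rfl <;> ring
  · have hcop : IsCoprime sr sc := Int.isCoprime_iff_gcd_eq_one.mpr hco
    have hdvd : sr ∣ u := hcop.dvd_of_dvd_mul_left ⟨v, by linarith [h]⟩
    rcases hdvd with ⟨t, rfl⟩
    refine ⟨t, by ring, ?_⟩
    have : sr * v = sr * (t * sc) := by rw [h]; ring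
    exact mul_left_cancel₀ hsr this

theorem pv_witness_ok :
    Dom_count_unique_antinodes_part2 pvWitness_count_unique_antinodes_part2 ∧
    Pre_count_unique_antinodes_part2 pvWitness_count_unique_antinodes_part2 := by
  constructor <;> decide


lemma pv_line_mem (rows cols : Int) (a b : Int × Int) (g sr sc : Int)
    (hg : g = Int.gcd (b.1 - a.1) (b.2 - a.2))
    (hsr : sr = PySem.Int.floordiv (b.1 - a.1) g)
    (hsc : sc = PySem.Int.floordiv (b.2 - a.2) g)
    (hab : a ≠ b) (ha : pvInR rows cols a)
    (s : PySem.Set (Int × Int)) (x : Int × Int) :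
    x ∈ pvWalk ((rows + cols).toNat + 2) rows cols sr sc (a.1 + sr) (a.2 + sc)
          (pvWalk ((rows + cols).toNat + 2) rows cols (-sr) (-sc) a.1 a.2 s)
      ↔ x ∈ s ∨ (pvInR rows cols x ∧ pvColl a b x) := by
  obtain ⟨a1, a2⟩ := a
  obtain ⟨b1, b2⟩ := b
  obtain ⟨x1, x2⟩ := x
  simp only [pvInR] at ha
  have hne : ¬(b1 - a1 = 0 ∧ b2 - a2 = 0) := by
    rintro ⟨h1, h2⟩
    exact hab (by simp only [Prod.ext_iff]; constructor <;> omega)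
  have hgpos : 0 < g := by
    rcases Nat.eq_zero_or_pos (Int.gcd (b1 - a1) (b2 - a2)) with hz | hp
    · exact absurd (Int.gcd_eq_zero_iff.mp hz) hne
    · simp only [hg]; exact_mod_cast hp
  have hdvd1 : g ∣ b1 - a1 := hg ▸ Int.gcd_dvd_left ..
  have hdvd2 : g ∣ b2 - a2 := hg ▸ Int.gcd_dvd_right ..
  have hsr' : sr = (b1 - a1) / g := by
    rw [hsr, PySem.Int.floordiv_eq_ediv_of_pos hgpos]
  have hsc' : sc = (b2 - a2) / g := by
    rw [hsc, PySem.Int.floordiv_eq_ediv_of_pos hgpos]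
  have hdr : sr * g = b1 - a1 := by rw [hsr']; exact Int.ediv_mul_cancel hdvd1
  have hdc : sc * g = b2 - a2 := by rw [hsc']; exact Int.ediv_mul_cancel hdvd2
  have hco : Int.gcd sr sc = 1 := by
    rw [hsr', hsc', hg]
    exact Int.gcd_div_gcd_div_gcd (by rw [hg] at hgpos; exact_mod_cast hgpos)
  have hrowpos : 0 < rows := by omega
  have hcolpos : 0 < cols := by omega
  have hNcast : (((rows + cols).toNat : Int)) = rows + cols := by omega
  rw [pv_mem_pvWalk, pv_mem_pvWalk]
  constructor
  · rintro ((hx | ⟨k, hk, hok, hxeq⟩) | ⟨k, hk, hok, hxeq⟩)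
    · exact Or.inl hx
    · have hin := hok k (le_refl _)
      rw [← hxeq] at hin
      refine Or.inr ⟨hin, ?_⟩
      simp only [Prod.ext_iff] at hxeq
      obtain ⟨he1, he2⟩ := hxeq
      simp only [pvColl]
      rw [← hdr, ← hdc]
      subst he1; subst he2; ring
    · have hin := hok k (le_refl _)
      rw [← hxeq] at hin
      refine Or.inr ⟨hin, ?_⟩
      simp only [Prod.ext_iff] at hxeq
      obtain ⟨he1, he2⟩ := hxeq
      simp only [pvColl]
      rw [← hdr, ← hdc]
      subst he1; subst he2; ring
  · rintro (hx | ⟨hin, hcoll⟩)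
    · exact Or.inl (Or.inl hx)
    · simp only [pvInR] at hin
      have hcoll' : sr * (x2 - a2) = sc * (x1 - a1) := by
        have hgg : g * (sr * (x2 - a2)) = g * (sc * (x1 - a1)) := by
          simp only [pvColl] at hcoll
          rw [← hdr, ← hdc] at hcoll
          linear_combination hcoll
        exact mul_left_cancel₀ (by omega) hgg
      obtain ⟨t, hu, hv⟩ := pv_exists_t hco hcoll'
      have hsrsc : ¬(sr = 0 ∧ sc = 0) := by
        rintro ⟨h1, h2⟩
        rw [h1] at hdr; rw [h2] at hdc
        exact hne ⟨by omega, by omega⟩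
      have htbound : (t.natAbs : Int) < rows + cols := by
        by_cases hsr0 : sr = 0
        · have hsc0 : sc ≠ 0 := fun h => hsrsc ⟨hsr0, h⟩
          have h1 : t.natAbs * sc.natAbs = (x2 - a2).natAbs := by
            rw [← Int.natAbs_mul, ← hv]
          have h2 : (x2 - a2).natAbs < cols.toNat := by omega
          have h3 : 1 ≤ sc.natAbs := by omega
          have h4 : t.natAbs < cols.toNat := by nlinarith
          omega
        · have h1 : t.natAbs * sr.natAbs = (x1 - a1).natAbs := by
            rw [← Int.natAbs_mul, ← hu]
          have h2 : (x1 - a1).natAbs < rows.toNat := by omega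
          have h3 : 1 ≤ sr.natAbs := by omega
          have h4 : t.natAbs < rows.toNat := by nlinarith
          omega
      rcases (by omega : t ≤ 0 ∨ 0 < t) with ht | ht
      · -- reached by the backward walk at k = |t|
        have hnat : (t.natAbs : Int) = -t := by omega
        have hend1 : a1 + (t.natAbs : Int) * (-sr) = x1 := by
          rw [hnat]; linear_combination -hu
        have hend2 : a2 + (t.natAbs : Int) * (-sc) = x2 := by
          rw [hnat]; linear_combination -hv
        refine Or.inl (Or.inr ⟨t.natAbs, by omega, ?_, ?_⟩)
        · intro m hm
          have hm' : (m : Int) ≤ (t.natAbs : Int) := by exact_mod_cast hm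
          have e1 := pv_between a1 rows (-sr) (by positivity) hm' ⟨ha.1, ha.2.1⟩
            (by rw [hend1]; exact ⟨hin.1, hin.2.1⟩)
          have e2 := pv_between a2 cols (-sc) (by positivity) hm' ⟨ha.2.2.1, ha.2.2.2⟩
            (by rw [hend2]; exact ⟨hin.2.2.1, hin.2.2.2⟩)
          exact ⟨e1.1, e1.2, e2.1, e2.2⟩
        · simp only [Prod.ext_iff]
          constructor
          · rw [← hend1]
          · rw [← hend2]
      · -- reached by the forward walk at k = t - 1
        have hnat : (((t - 1).toNat : Int)) = t - 1 := by omega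
        have hend1 : a1 + t * sr = x1 := by linear_combination -hu
        have hend2 : a2 + t * sc = x2 := by linear_combination -hv
        refine Or.inr ⟨(t - 1).toNat, by omega, ?_, ?_⟩
        · intro m hm
          have hm' : ((m : Int) + 1) ≤ t := by
            have : (m : Int) ≤ ((t - 1).toNat : Int) := by exact_mod_cast hm
            omega
          have e1 := pv_between a1 rows sr (by positivity : (0:Int) ≤ (m : Int) + 1) hm'
            ⟨ha.1, ha.2.1⟩ (by rw [hend1]; exact ⟨hin.1, hin.2.1⟩)
          have e2 := pv_between a2 cols sc (by positivity : (0:Int) ≤ (m : Int) + 1) hm'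
            ⟨ha.2.2.1, ha.2.2.2⟩ (by rw [hend2]; exact ⟨hin.2.2.1, hin.2.2.2⟩)
          have r1 : a1 + sr + (m : Int) * sr = a1 + ((m : Int) + 1) * sr := by ring
          have r2 : a2 + sc + (m : Int) * sc = a2 + ((m : Int) + 1) * sc := by ring
          exact ⟨by rw [r1]; exact e1.1, by rw [r1]; exact e1.2,
                 by rw [r2]; exact e2.1, by rw [r2]; exact e2.2⟩
        · simp only [Prod.ext_iff]
          constructor
          · rw [hnat, ← hend1]; ring
          · rw [hnat, ← hend2]; ring

def pvCells (grid : List String) : List (Char × (Int × Int)) :=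
  (PySem.List.enumerate grid 0).flatMap (fun p =>
    ((PySem.List.enumerate p.2.toList 0).filter (fun q => decide (q.2 ≠ '.'))).map
      (fun q => (q.2, (p.1, q.1))))

lemma pv_dict_eq (grid : List String) :
    pvFindAntennas grid =
      (pvCells grid).foldl (fun d p => d.modify p.1 [] (· ++ [p.2])) PySem.Dict.empty := by
  unfold pvFindAntennas pvCells
  rw [List.foldl_flatMap]
  apply PySem.List.foldl_congr_mem
  intro d p _
  rw [PySem.List.foldl_ite_eq_foldl_filter (fun q : Int × Char => q.2 ≠ '.')
    (fun d q => d.modify q.2 [] (· ++ [(p.1, q.1)])) (PySem.List.enumerate p.2.toList 0) d,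
    List.foldl_map]

lemma pv_getD (grid : List String) (ch : Char) :
    (pvFindAntennas grid).getD ch [] =
      ((pvCells grid).filter (fun p => p.1 == ch)).map (·.2) := by
  rw [pv_dict_eq, PySem.Dict.getD_foldl_modify_append]
  simp

lemma pv_keys_nodup (grid : List String) : (pvFindAntennas grid).keys.Nodup := by
  rw [pv_dict_eq]
  exact PySem.Dict.nodup_keys_foldl_modify_key (pvCells grid) (fun p => p.1) []
    (fun _ p => (· ++ [p.2])) PySem.Dict.empty (by simp)

lemma pv_cells_snd_nodup (grid : List String) : ((pvCells grid).map (·.2)).Nodup := by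
  unfold pvCells
  rw [List.map_flatMap]
  simp only [List.map_map]
  rw [List.nodup_flatMap]
  constructor
  · intro p _
    have hpw : ((PySem.List.enumerate p.2.toList 0).filter
        (fun q => decide (q.2 ≠ '.'))).Pairwise (fun q q' => q.1 < q'.1) :=
      (PySem.List.pairwise_lt_enumerate _ _).sublist List.filter_sublist
    exact List.Pairwise.map _
      (fun a b h => fun he => by
        have h2 := congrArg Prod.snd he; simp at h2; omega) hpw
  · refine (PySem.List.pairwise_lt_enumerate _ _).imp ?_
    intro p p' hlt a ha ha'
    simp only [List.mem_map, List.mem_filter] at ha ha'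
    obtain ⟨q, _, rfl⟩ := ha
    obtain ⟨q', _, he⟩ := ha'
    have : p'.1 = p.1 := (Prod.ext_iff.mp he).1
    omega

lemma pv_pts_nodup (grid : List String) (ch : Char) :
    ((pvFindAntennas grid).getD ch []).Nodup := by
  rw [pv_getD]
  exact List.Nodup.sublist (List.Sublist.map _ List.filter_sublist) (pv_cells_snd_nodup grid)

lemma pv_mem_cells (grid : List String) (ch : Char) (y : Int × Int)
    (h : (ch, y) ∈ pvCells grid) :
    ch ≠ '.' ∧ 0 ≤ y.1 ∧ y.1 < grid.length ∧ 0 ≤ y.2 ∧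
      ∃ s ∈ grid, (ch, y.2.toNat) ∈ s.toList.zipIdx := by
  unfold pvCells at h
  rw [List.mem_flatMap] at h
  obtain ⟨p, hp, hy⟩ := h
  rw [List.mem_map] at hy
  obtain ⟨q, hq, he⟩ := hy
  rw [List.mem_filter] at hq
  obtain ⟨hq, hdot⟩ := hq
  rw [PySem.List.mem_enumerate_iff] at hp
  obtain ⟨k, hk, rfl⟩ := hp
  rw [PySem.List.mem_enumerate_iff] at hq
  obtain ⟨j, hj, rfl⟩ := hq
  simp only [Prod.ext_iff] at he
  obtain ⟨hch, h1, h2⟩ := he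
  simp only at hdot
  refine ⟨by rw [← hch]; simpa using hdot, by omega, by omega, by omega, grid[k], List.getElem_mem hk, ?_⟩
  rw [List.mk_mem_zipIdx_iff_getElem?]
  have hy2 : y.2.toNat = j := by omega
  rw [hy2, List.getElem?_eq_getElem hj, ← hch]


lemma pv_pts_le_count (grid : List String) (ch : Char) :
    ((pvFindAntennas grid).getD ch []).length ≤
      (grid.map String.toList).flatten.count ch := by
  rw [pv_getD, List.length_map, ← List.countP_eq_length_filter]
  have h1 : (pvCells grid).countP (fun p => p.1 == ch) =
      ((pvCells grid).map (·.1)).count ch := by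
    rw [List.count_eq_countP, List.countP_map]; rfl
  rw [h1, ← List.flatMap_def]
  refine List.Sublist.count_le _ ?_
  have e1 : (pvCells grid).map (·.1) =
      (PySem.List.enumerate grid 0).flatMap
        (fun p => ((PySem.List.enumerate p.2.toList 0).filter
          (fun q => decide (q.2 ≠ '.'))).map (·.2)) := by
    unfold pvCells
    rw [List.map_flatMap]
    simp only [List.map_map]
    rfl
  have e2 : grid.flatMap String.toList =
      (PySem.List.enumerate grid 0).flatMap (fun p => p.2.toList) := by
    conv_lhs => rw [← PySem.List.map_snd_enumerate grid 0]
    rw [List.flatMap_map]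
  rw [e1, e2]
  refine List.Sublist.flatMap_right _ ?_
  intro p _
  conv_rhs => rw [← PySem.List.map_snd_enumerate p.2.toList 0]
  exact List.Sublist.map _ List.filter_sublist

lemma pv_pts_inR (g0 : String) (rest : List String)
    (hpre : Pre_count_unique_antinodes_part2 (g0 :: rest)) (ch : Char)
    (hlen : 2 ≤ ((pvFindAntennas (g0 :: rest)).getD ch []).length) :
    ∀ y ∈ (pvFindAntennas (g0 :: rest)).getD ch [],
      pvInR ((g0 :: rest) : List String).length (PySem.Str.len g0) y := by
  intro y hy
  rw [pv_getD] at hy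
  rw [List.mem_map] at hy
  obtain ⟨p, hp, hpy⟩ := hy
  rw [List.mem_filter] at hp
  obtain ⟨hp, hpeq⟩ := hp
  have hcell : (ch, y) ∈ pvCells (g0 :: rest) := by
    have : p = (ch, y) := by
      obtain ⟨p1, p2⟩ := p
      simp only at hpy
      simp only [beq_iff_eq] at hpeq
      rw [Prod.ext_iff]
      exact ⟨hpeq, hpy⟩
    rw [← this]; exact hp
  obtain ⟨hdot, h1, h2, h3, s, hs, hzip⟩ := pv_mem_cells _ _ _ hcell
  have hcount : 2 ≤ ((g0 :: rest).map String.toList).flatten.count ch :=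
    le_trans hlen (pv_pts_le_count _ _)
  have hj := hpre s hs (ch, y.2.toNat) hzip hdot hcount
  simp only [List.headD_cons] at hj
  refine ⟨h1, h2, h3, ?_⟩
  simp only [PySem.Str.len]
  omega

def pvPairRel (grid : List String) (a b : Int × Int) : Prop :=
  ∃ ch, ∃ i j : Nat, i < j ∧
    ((pvFindAntennas grid).getD ch [])[i]? = some a ∧
    ((pvFindAntennas grid).getD ch [])[j]? = some b

def pvHit (grid : List String) (x : Int × Int) : Prop :=
  ∃ a b, pvPairRel grid a b ∧ pvColl a b x

lemma pv_items_getD (grid : List String) (ch : Char) (pts : List (Int × Int)) :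
    (ch, pts) ∈ (pvFindAntennas grid).items ↔
      ((pvFindAntennas grid).get? ch = some pts) :=
  (PySem.Dict.get?_eq_some_iff_mem_items _ ch pts (pv_keys_nodup grid)).symm

lemma pv_pairRel_iff (grid : List String) (a b : Int × Int) :
    pvPairRel grid a b ↔
      ∃ pts, pts ∈ (pvFindAntennas grid).items.map (·.2) ∧
        ∃ i j : Nat, i < j ∧ pts[i]? = some a ∧ pts[j]? = some b := by
  constructor
  · rintro ⟨ch, i, j, hij, h1, h2⟩
    set pts := (pvFindAntennas grid).getD ch [] with hpts
    have hne : pts ≠ [] := by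
      intro he; rw [he] at h2; simp at h2
    have hget : (pvFindAntennas grid).get? ch = some pts := by
      cases hc : (pvFindAntennas grid).get? ch with
      | none => exact absurd (hpts.trans (PySem.Dict.getD_of_get?_eq_none _ _ hc)) hne
      | some v =>
        have hv : pts = v := by rw [hpts, PySem.Dict.getD_eq_get?_getD, hc, Option.getD_some]
        rw [hv]
    refine ⟨pts, ?_, i, j, hij, h1, h2⟩
    rw [List.mem_map]
    exact ⟨(ch, pts), (pv_items_getD grid ch pts).mpr hget, rfl⟩
  · rintro ⟨pts, hmem, i, j, hij, h1, h2⟩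
    rw [List.mem_map] at hmem
    obtain ⟨fp, hfp, rfl⟩ := hmem
    refine ⟨fp.1, i, j, hij, ?_, ?_⟩
    · rw [PySem.Dict.getD_of_mem_items _ (by rw [Prod.mk.eta]; exact hfp)
        (pv_keys_nodup grid)]
      exact h1
    · rw [PySem.Dict.getD_of_mem_items _ (by rw [Prod.mk.eta]; exact hfp)
        (pv_keys_nodup grid)]
      exact h2

lemma pv_pairStep_mem (rows cols : Int) (pts : List (Int × Int)) (hnd : pts.Nodup)
    (hin : ∀ y ∈ pts, pvInR rows cols y) (i j : Int) (hi : 0 ≤ i) (hij : i < j)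
    (hj : j < (pts.length : Int)) (s : PySem.Set (Int × Int)) (x : Int × Int) :
    x ∈ pvPairStep rows cols ((rows + cols).toNat + 2) pts s i j ↔
      x ∈ s ∨ (pvInR rows cols x ∧
        pvColl (pts.getD i.toNat (0, 0)) (pts.getD j.toNat (0, 0)) x) := by
  rw [List.getD_eq_getElem pts (0, 0) (by omega : i.toNat < pts.length),
      List.getD_eq_getElem pts (0, 0) (by omega : j.toNat < pts.length)]
  have hgi : PySem.List.pyGetD pts i (0, 0) = pts[i.toNat]'(by omega) :=
    PySem.List.pyGetD_eq_getElem pts (0, 0) hi (by omega)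
  have hgj : PySem.List.pyGetD pts j (0, 0) = pts[j.toNat]'(by omega) :=
    PySem.List.pyGetD_eq_getElem pts (0, 0) (by omega) hj
  have hab : pts[i.toNat]'(by omega) ≠ pts[j.toNat]'(by omega) := by
    intro he
    have := (List.Nodup.getElem_inj_iff hnd).mp he
    omega
  have ha : pvInR rows cols (pts[i.toNat]'(by omega)) := hin _ (List.getElem_mem _)
  show x ∈ pvWalk _ rows cols _ _ _ _ (pvWalk _ rows cols _ _ _ _ s) ↔ _
  rw [hgi, hgj]
  exact pv_line_mem rows cols _ _ _ _ _ rfl rfl rfl hab ha s x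

lemma pv_pairStep_nodup (rows cols : Int) (fuel : Nat) (pts : List (Int × Int))
    (s : PySem.Set (Int × Int)) (i j : Int) (hs : s.Nodup) :
    (pvPairStep rows cols fuel pts s i j).Nodup := by
  unfold pvPairStep
  exact pv_nodup_pvWalk _ _ _ _ _ _ _ _ (pv_nodup_pvWalk _ _ _ _ _ _ _ _ hs)

lemma pv_pairsB_mem (pts : List (Int × Int)) :
    ∀ (ps : List ((Int × Int) × (Int × Int))) (x : (Int × Int) × (Int × Int)),
      x ∈ pvPairsB pts ps ↔
        x ∈ ps ∨ ∃ i j : Nat, i < j ∧ pts[i]? = some x.1 ∧ pts[j]? = some x.2 := by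
  induction pts with
  | nil =>
    intro ps x
    simp [pvPairsB]
  | cons a rest ih =>
    intro ps x
    rw [pvPairsB, ih, PySem.List.foldl_append_singleton_eq_map]
    constructor
    · rintro (hx | ⟨i, j, hij, h1, h2⟩)
      · rw [List.mem_append] at hx
        rcases hx with hx | hx
        · exact Or.inl hx
        · rw [List.mem_map] at hx
          obtain ⟨b, hb, hxe⟩ := hx
          obtain ⟨k, hk⟩ := List.mem_iff_getElem?.mp hb
          refine Or.inr ⟨0, k + 1, by omega, ?_, ?_⟩
          · rw [← hxe]; simp
          · rw [← hxe]; simpa using hk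
      · refine Or.inr ⟨i + 1, j + 1, by omega, by simpa using h1, by simpa using h2⟩
    · rintro (hx | ⟨i, j, hij, h1, h2⟩)
      · exact Or.inl (List.mem_append_left _ hx)
      · cases i with
        | zero =>
          obtain ⟨j', rfl⟩ : ∃ j', j = j' + 1 := ⟨j - 1, by omega⟩
          simp only [List.getElem?_cons_zero, List.getElem?_cons_succ] at h1 h2
          refine Or.inl (List.mem_append_right _ ?_)
          rw [List.mem_map]
          refine ⟨x.2, List.mem_iff_getElem?.mpr ⟨j', h2⟩, ?_⟩
          have : x.1 = a := by simpa using h1.symm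
          rw [← this, Prod.mk.eta]
        | succ i =>
          obtain ⟨j', rfl⟩ : ∃ j', j = j' + 1 := ⟨j - 1, by omega⟩
          simp only [List.getElem?_cons_succ] at h1 h2
          exact Or.inr ⟨i, j', by omega, h1, h2⟩

def pvRect (rows cols : Int) : List (Int × Int) :=
  (PySem.List.pyRange 0 rows 1).flatMap (fun r =>
    (PySem.List.pyRange 0 cols 1).map (fun c => (r, c)))

lemma pv_rect_mem (rows cols : Int) (x : Int × Int) :
    x ∈ pvRect rows cols ↔ pvInR rows cols x := by
  unfold pvRect pvInR
  rw [List.mem_flatMap]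
  constructor
  · rintro ⟨r, hr, hx⟩
    rw [List.mem_map] at hx
    obtain ⟨c, hc, rfl⟩ := hx
    rw [PySem.List.mem_pyRange_one] at hr hc
    exact ⟨hr.1, hr.2, hc.1, hc.2⟩
  · rintro ⟨h1, h2, h3, h4⟩
    refine ⟨x.1, PySem.List.mem_pyRange_one.mpr ⟨h1, h2⟩, ?_⟩
    rw [List.mem_map]
    exact ⟨x.2, PySem.List.mem_pyRange_one.mpr ⟨h3, h4⟩, by rw [Prod.mk.eta]⟩

lemma pv_rect_nodup (rows cols : Int) : (pvRect rows cols).Nodup := by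
  unfold pvRect
  rw [List.nodup_flatMap]
  constructor
  · intro r _
    exact List.Pairwise.map _
      (fun a b h => fun he => by
        have h2 := congrArg Prod.snd he; simp at h2; omega)
      ((PySem.List.pairwise_lt_pyRange_one 0 cols).imp (fun h => h))
  · refine (PySem.List.pairwise_lt_pyRange_one 0 rows).imp ?_
    intro r r' hlt a ha ha'
    rw [List.mem_map] at ha ha'
    obtain ⟨c, _, rfl⟩ := ha
    obtain ⟨c', _, he⟩ := ha'
    have : r' = r := (Prod.ext_iff.mp he).1
    omega

lemma pv_count_eq (rows cols : Int) (q : Int → Int → Prop) [∀ r c, Decidable (q r c)] :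
    (PySem.List.pyRange 0 rows 1).foldl (fun t r =>
        (PySem.List.pyRange 0 cols 1).foldl (fun t c => if q r c then t + 1 else t) t) 0
      = ((pvRect rows cols).countP (fun x => decide (q x.1 x.2)) : Int) := by
  have hinner : ∀ (t : Int) (r : Int),
      (PySem.List.pyRange 0 cols 1).foldl (fun t c => if q r c then t + 1 else t) t
        = t + ((PySem.List.pyRange 0 cols 1).countP (fun c => decide (q r c)) : Int) :=
    fun t r => PySem.List.foldl_ite_add_one (q r) _ t
  calc (PySem.List.pyRange 0 rows 1).foldl (fun t r =>
          (PySem.List.pyRange 0 cols 1).foldl (fun t c => if q r c then t + 1 else t) t) 0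
      = (PySem.List.pyRange 0 rows 1).foldl (fun t r =>
          t + ((PySem.List.pyRange 0 cols 1).countP (fun c => decide (q r c)) : Int)) 0 :=
        PySem.List.foldl_congr_mem _ _ _ _ (fun t r _ => hinner t r)
    _ = 0 + (((PySem.List.pyRange 0 rows 1).map (fun r =>
          (((PySem.List.pyRange 0 cols 1).countP (fun c => decide (q r c)) : Nat) : Int))).sum) :=
        PySem.List.foldl_add _ _ 0
    _ = ((pvRect rows cols).countP (fun x => decide (q x.1 x.2)) : Int) := by
        rw [zero_add]
        unfold pvRect
        rw [List.countP_flatMap]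
        rw [Nat.cast_list_sum, List.map_map]
        refine congrArg List.sum (List.map_congr_left ?_)
        intro r _
        simp only [Function.comp_apply, List.countP_map]
        rfl

lemma pv_main (g0 : String) (rest : List String)
    (hpre : Pre_count_unique_antinodes_part2 (g0 :: rest)) :
    count_unique_antinodes_part2 (g0 :: rest) = count_unique_antinodes_part2_alt (g0 :: rest) := by
  set grid : List String := g0 :: rest with hgrid
  set rows : Int := (grid.length : Int) with hrows
  set cols : Int := PySem.Str.len g0 with hcols
  set fuel : Nat := (rows + cols).toNat + 2 with hfuel
  set d := pvFindAntennas grid with hd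
  set fA : PySem.Set (Int × Int) → Char × List (Int × Int) → PySem.Set (Int × Int) :=
    fun s fp =>
      if fp.2.length < 2 then s else
      (PySem.List.pyRange 0 (fp.2.length : Int) 1).foldl (fun s i =>
        (PySem.List.pyRange (i + 1) (fp.2.length : Int) 1).foldl
          (fun s j => pvPairStep rows cols fuel fp.2 s i j) s) s with hfA
  have hA : count_unique_antinodes_part2 grid =
      PySem.Set.len (d.items.foldl fA PySem.Set.empty) := rfl
  set S := d.items.foldl fA PySem.Set.empty with hSdef
  have hfacts : ∀ fp ∈ d.items, fp.2 = d.getD fp.1 [] ∧ fp.2.Nodup := by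
    intro fp hfp
    have h1 : d.getD fp.1 [] = fp.2 :=
      PySem.Dict.getD_of_mem_items _ (by rw [Prod.mk.eta]; exact hfp) (pv_keys_nodup grid) []
    refine ⟨h1.symm, ?_⟩
    rw [← h1]
    exact pv_pts_nodup grid fp.1
  have hbody : ∀ s fp, fp ∈ d.items → ∀ x, x ∈ fA s fp ↔ x ∈ s ∨
      (¬ fp.2.length < 2 ∧ ∃ i ∈ PySem.List.pyRange 0 (fp.2.length : Int) 1,
        ∃ j ∈ PySem.List.pyRange (i + 1) (fp.2.length : Int) 1,
          pvInR rows cols x ∧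
            pvColl (fp.2.getD i.toNat (0, 0)) (fp.2.getD j.toNat (0, 0)) x) := by
    intro s fp hfp x
    obtain ⟨hgetD, hnd⟩ := hfacts fp hfp
    simp only [hfA]
    by_cases hlen : fp.2.length < 2
    · rw [if_pos hlen]
      simp [hlen]
    · rw [if_neg hlen]
      have hin : ∀ y ∈ fp.2, pvInR rows cols y := by
        rw [hgetD]
        exact pv_pts_inR g0 rest hpre fp.1 (by rw [← hgetD]; omega)
      rw [pv_foldl_mem (fun i x => ∃ j ∈ PySem.List.pyRange (i + 1) (fp.2.length : Int) 1,
            pvInR rows cols x ∧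
              pvColl (fp.2.getD i.toNat (0, 0)) (fp.2.getD j.toNat (0, 0)) x) _ _ ?_ s x]
      · simp [hlen]
      · intro s' i hi x'
        rw [pv_foldl_mem (fun j x => pvInR rows cols x ∧
              pvColl (fp.2.getD i.toNat (0, 0)) (fp.2.getD j.toNat (0, 0)) x) _ _ ?_ s' x']
        intro s'' j hj x''
        rw [PySem.List.mem_pyRange_one] at hi hj
        rw [hfuel]
        exact pv_pairStep_mem rows cols fp.2 hnd hin i j hi.1 (by omega) (by omega) s'' x''
  have hSmem : ∀ x, x ∈ S ↔ (pvInR rows cols x ∧ pvHit grid x) := by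
    intro x
    rw [hSdef, pv_foldl_mem _ d.items fA hbody PySem.Set.empty x]
    constructor
    · rintro (he | ⟨fp, hfp, hguard, i, hi, j, hj, hinx, hcoll⟩)
      · exact absurd he (List.not_mem_nil)
      · rw [PySem.List.mem_pyRange_one] at hi hj
        have hjlen : j.toNat < fp.2.length := by omega
        have hilen : i.toNat < fp.2.length := by omega
        refine ⟨hinx, fp.2.getD i.toNat (0, 0), fp.2.getD j.toNat (0, 0), ?_, hcoll⟩
        rw [pv_pairRel_iff]
        refine ⟨fp.2, List.mem_map.mpr ⟨fp, hfp, rfl⟩, i.toNat, j.toNat, by omega, ?_, ?_⟩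
        · rw [List.getD_eq_getElem _ _ hilen, List.getElem?_eq_getElem hilen]
        · rw [List.getD_eq_getElem _ _ hjlen, List.getElem?_eq_getElem hjlen]
    · rintro ⟨hinx, a, b, hrel, hcoll⟩
      rw [pv_pairRel_iff] at hrel
      obtain ⟨pts, hpts, i, j, hij, h1, h2⟩ := hrel
      obtain ⟨fp, hfp, rfl⟩ := List.mem_map.mp hpts
      obtain ⟨hjlen, he2⟩ := List.getElem?_eq_some_iff.mp h2
      obtain ⟨hilen, he1⟩ := List.getElem?_eq_some_iff.mp h1
      refine Or.inr ⟨fp, hfp, by omega, (i : Int), ?_, (j : Int), ?_, hinx, ?_⟩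
      · rw [PySem.List.mem_pyRange_one]
        constructor
        · positivity
        · exact_mod_cast hilen
      · rw [PySem.List.mem_pyRange_one]
        constructor
        · exact_mod_cast hij
        · exact_mod_cast hjlen
      · rw [Int.toNat_natCast, Int.toNat_natCast,
          List.getD_eq_getElem _ _ hilen, List.getD_eq_getElem _ _ hjlen, he1, he2]
        exact hcoll
  have hSnodup : S.Nodup := by
    rw [hSdef]
    refine pv_foldl_nodup _ fA ?_ _ List.nodup_nil
    intro s fp _ hs
    simp only [hfA]
    split
    · exact hs
    · refine pv_foldl_nodup _ _ ?_ _ hs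
      intro s' i _ hs'
      refine pv_foldl_nodup _ _ ?_ _ hs'
      intro s'' j _ hs''
      exact pv_pairStep_nodup rows cols fuel fp.2 s'' i j hs''
  -- B side
  set pairs := d.values.foldl (fun ps pts => pvPairsB pts ps) [] with hpairsdef
  set q : Int → Int → Prop := fun r c => (pairs.any (fun pr =>
      (pr.2.1 - pr.1.1) * (c - pr.1.2) == (pr.2.2 - pr.1.2) * (r - pr.1.1))) = true with hq
  have hB : count_unique_antinodes_part2_alt grid =
      (PySem.List.pyRange 0 rows 1).foldl (fun t r =>
        (PySem.List.pyRange 0 cols 1).foldl (fun t c => if q r c then t + 1 else t) t) 0 := rfl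
  have hBc : count_unique_antinodes_part2_alt grid =
      ((pvRect rows cols).countP (fun x => decide (q x.1 x.2)) : Int) :=
    hB.trans (pv_count_eq rows cols q)
  have hpairs_mem : ∀ pr : (Int × Int) × (Int × Int), pr ∈ pairs ↔ pvPairRel grid pr.1 pr.2 := by
    intro pr
    rw [hpairsdef, pv_foldl_mem
      (fun pts pr => ∃ i j : Nat, i < j ∧ pts[i]? = some pr.1 ∧ pts[j]? = some pr.2)
      d.values _ (fun ps pts _ x => pv_pairsB_mem pts ps x) [] pr]
    rw [pv_pairRel_iff]
    simp only [List.not_mem_nil, false_or]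
    rfl
  have hqiff : ∀ x : Int × Int, (decide (q x.1 x.2) = true) ↔ pvHit grid x := by
    intro x
    simp only [decide_eq_true_iff, hq, List.any_eq_true]
    constructor
    · rintro ⟨pr, hpr, hbeq⟩
      rw [beq_iff_eq] at hbeq
      exact ⟨pr.1, pr.2, (hpairs_mem pr).mp hpr, hbeq⟩
    · rintro ⟨a, b, hrel, hcoll⟩
      exact ⟨(a, b), (hpairs_mem (a, b)).mpr hrel, by rw [beq_iff_eq]; exact hcoll⟩
  have hperm : S.Perm ((pvRect rows cols).filter (fun x => decide (q x.1 x.2))) := by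
    rw [List.perm_ext_iff_of_nodup hSnodup ((pv_rect_nodup rows cols).filter _)]
    intro x
    rw [hSmem x, List.mem_filter, pv_rect_mem, hqiff]
  rw [hA, hBc]
  show ((S.length : Nat) : Int) = _
  rw [List.countP_eq_length_filter]
  exact congrArg Nat.cast hperm.length_eq
-- ===== VERDICT (by name: the statement is the Claim_ definition above) =====
theorem count_unique_antinodes_part2_spec : Claim_equal_count_unique_antinodes_part2 := by
  intro grid hdom hpre
  unfold Spec_count_unique_antinodes_part2
  cases grid with
  | nil => rfl
  | cons g0 rest => exact pv_main g0 rest hpre
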